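-- pv_equiv track=rewrite | github.com/kaypton/genesis | statemanager/autoscaler/controller/swift_scaler.py | choose_pod_to_rr
-- ===== SOURCE A (Python) =====
-- from typing import List, Dict, Tuple
--
-- def choose_pod_to_rr(rcn_pods: List[Dict],
--                      rln_pods: List[Dict], inited_pods: List[Dict],
--                      nr: int) -> List[Dict]:
--     ret_pods = list()
--     warm = 0
--
--     while len(ret_pods) < nr and len(rcn_pods) > 0:
--         ret_pods.append(rcn_pods.pop(0))
--     if len(ret_pods) == nr:
--         return ret_pods, warm
--     else:
--         while len(ret_pods) < nr and len(rln_pods) > 0: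
--             ret_pods.append(rln_pods.pop(0))
--         if len(ret_pods) == nr:
--             return ret_pods, warm
--         else:
--             while len(ret_pods) < nr and len(inited_pods) > 0:
--                 warm += 1
--                 ret_pods.append(inited_pods.pop(0))
--
--     return ret_pods, warm
-- ===== SOURCE B (Python) =====
-- def choose_pod_to_rr(rcn_pods, rln_pods, inited_pods, nr):
--     need = max(nr, 0)
--     a = rcn_pods[:need]
--     b = rln_pods[:need - len(a)]
--     c = inited_pods[:need - len(a) - len(b)]
--     del rcn_pods[:len(a)]
--     del rln_pods[:len(b)]
--     del inited_pods[:len(c)]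
--     return a + b + c, len(c)
-- ===== Notes on version B (the rewrite author's own statement) =====
-- stated objective: simpler
-- what changed: Replaces the three while-pop loops and nested if/else cascade with a closed-form computation: three slices whose lengths are determined arithmetically from nr, concatenated, with warm = length of the slice taken from inited_pods; B performs the same in-place removal from the argument lists as A.
import Mathlib
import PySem

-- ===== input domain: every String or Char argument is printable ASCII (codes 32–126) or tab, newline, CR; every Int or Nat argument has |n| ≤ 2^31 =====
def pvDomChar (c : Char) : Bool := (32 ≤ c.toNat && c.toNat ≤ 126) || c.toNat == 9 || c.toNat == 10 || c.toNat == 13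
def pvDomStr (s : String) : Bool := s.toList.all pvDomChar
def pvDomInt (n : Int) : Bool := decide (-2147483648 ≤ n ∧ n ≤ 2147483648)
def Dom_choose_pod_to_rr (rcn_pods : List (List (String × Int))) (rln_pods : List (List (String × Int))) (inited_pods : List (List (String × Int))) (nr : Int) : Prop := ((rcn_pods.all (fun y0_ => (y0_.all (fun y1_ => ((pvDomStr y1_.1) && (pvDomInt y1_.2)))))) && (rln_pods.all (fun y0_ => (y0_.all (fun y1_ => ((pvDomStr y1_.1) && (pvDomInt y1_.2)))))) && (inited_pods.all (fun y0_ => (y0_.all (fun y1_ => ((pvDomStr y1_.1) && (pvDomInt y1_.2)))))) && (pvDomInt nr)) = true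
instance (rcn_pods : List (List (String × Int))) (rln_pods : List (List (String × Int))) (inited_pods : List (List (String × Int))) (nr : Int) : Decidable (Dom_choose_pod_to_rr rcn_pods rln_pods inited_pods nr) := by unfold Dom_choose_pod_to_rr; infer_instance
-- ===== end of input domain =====

-- B replaces A's three while-pop loops and if/else cascade with a closed-form slice computation
-- (objective: simpler). A mutates its list arguments in place (pop(0)); B performs the same
-- in-place removals in Python, but the equivalence proved here is about the RETURN value only.

-- ===== PORT A =====
-- while len(ret_pods) < nr and len(src) > 0: ret_pods.append(src.pop(0))
def pvFillA (ret : List (List (String × Int))) (src : List (List (String × Int))) (nr : Int) :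
    List (List (String × Int)) :=
  match src with
  | [] => ret
  | x :: rest => if (ret.length : Int) < nr then pvFillA (ret ++ [x]) rest nr else ret

-- same loop over inited_pods, also counting warm
def pvFillWarm (ret : List (List (String × Int))) (warm : Int) (src : List (List (String × Int))) (nr : Int) :
    List (List (String × Int)) × Int :=
  match src with
  | [] => (ret, warm)
  | x :: rest => if (ret.length : Int) < nr then pvFillWarm (ret ++ [x]) (warm + 1) rest nr else (ret, warm)

def choose_pod_to_rr (rcn_pods : List (List (String × Int))) (rln_pods : List (List (String × Int))) (inited_pods : List (List (String × Int))) (nr : Int) : (List (List (String × Int))) × Int :=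
  let ret₁ := pvFillA [] rcn_pods nr
  if (ret₁.length : Int) = nr then (ret₁, 0)
  else
    let ret₂ := pvFillA ret₁ rln_pods nr
    if (ret₂.length : Int) = nr then (ret₂, 0)
    else pvFillWarm ret₂ 0 inited_pods nr

-- ===== PORT B =====
def choose_pod_to_rr_alt (rcn_pods : List (List (String × Int))) (rln_pods : List (List (String × Int))) (inited_pods : List (List (String × Int))) (nr : Int) : (List (List (String × Int))) × Int :=
  let need := (max nr 0).toNat          -- nonnegative slice bound, so [:k] = take k
  let a := rcn_pods.take need
  let b := rln_pods.take (need - a.length)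
  let c := inited_pods.take (need - a.length - b.length)
  (a ++ b ++ c, (c.length : Int))

-- ===== PRECONDITION & SPEC =====
def Spec_choose_pod_to_rr (rcn_pods : List (List (String × Int))) (rln_pods : List (List (String × Int))) (inited_pods : List (List (String × Int))) (nr : Int) (out : (List (List (String × Int))) × Int) : Prop := out = choose_pod_to_rr_alt rcn_pods rln_pods inited_pods nr
instance (rcn_pods : List (List (String × Int))) (rln_pods : List (List (String × Int))) (inited_pods : List (List (String × Int))) (nr : Int) (out : (List (List (String × Int))) × Int) : Decidable (Spec_choose_pod_to_rr rcn_pods rln_pods inited_pods nr out) := by unfold Spec_choose_pod_to_rr; infer_instance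

-- ===== CLAIM (what is proved, stated in full; the proofs are below) =====
def Claim_equal_choose_pod_to_rr : Prop := ∀ (rcn_pods : List (List (String × Int))) (rln_pods : List (List (String × Int))) (inited_pods : List (List (String × Int))) (nr : Int), Dom_choose_pod_to_rr rcn_pods rln_pods inited_pods nr → Spec_choose_pod_to_rr rcn_pods rln_pods inited_pods nr (choose_pod_to_rr rcn_pods rln_pods inited_pods nr)

-- ===== LEMMAS AND PROOFS =====
lemma pvFillA_eq (src : List (List (String × Int))) : ∀ (ret : List (List (String × Int))) (nr : Int),
    pvFillA ret src nr = ret ++ src.take (nr - ret.length).toNat := by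
  induction src with
  | nil => intro ret nr; simp [pvFillA]
  | cons x rest ih =>
    intro ret nr
    by_cases h : (ret.length : Int) < nr
    · rw [pvFillA, if_pos h, ih]
      have hk : (nr - (ret.length : Int)).toNat = ((nr - (((ret ++ [x]).length : Nat) : Int)).toNat) + 1 := by
        simp; omega
      rw [hk, List.take_succ_cons]
      simp
    · rw [pvFillA, if_neg h]
      have hk : (nr - (ret.length : Int)).toNat = 0 := by omega
      simp [hk]

lemma pvFillWarm_eq (src : List (List (String × Int))) : ∀ (ret : List (List (String × Int))) (warm : Int) (nr : Int),
    pvFillWarm ret warm src nr =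
      (ret ++ src.take (nr - ret.length).toNat, warm + ((src.take (nr - ret.length).toNat).length : Int)) := by
  induction src with
  | nil => intro ret warm nr; simp [pvFillWarm]
  | cons x rest ih =>
    intro ret warm nr
    by_cases h : (ret.length : Int) < nr
    · rw [pvFillWarm, if_pos h, ih]
      have hk : (nr - (ret.length : Int)).toNat = ((nr - (((ret ++ [x]).length : Nat) : Int)).toNat) + 1 := by
        simp; omega
      rw [hk, List.take_succ_cons]
      refine Prod.ext (by simp) (by simp; omega)
    · rw [pvFillWarm, if_neg h]
      have hk : (nr - (ret.length : Int)).toNat = 0 := by omega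
      simp [hk]

-- ===== VERDICT (by name: the statement is the Claim_ definition above) =====
theorem choose_pod_to_rr_spec : Claim_equal_choose_pod_to_rr := by
  intro rcn rln ini nr _
  show _ = _
  unfold choose_pod_to_rr choose_pod_to_rr_alt
  have hmax : (nr - (([] : List (List (String × Int))).length : Int)).toNat = (max nr 0).toNat := by
    simp; omega
  rw [pvFillA_eq, hmax]
  simp only [List.nil_append]
  set t := (max nr 0).toNat with ht
  set a := rcn.take t with ha
  have hal : a.length ≤ t := by simp [ha]
  by_cases h1 : ((a.length : Nat) : Int) = nr
  · rw [if_pos h1]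
    have h0 : t - a.length = 0 := by omega
    simp [h0]
  · rw [if_neg h1]
    rw [pvFillA_eq]
    have h2 : (nr - (a.length : Int)).toNat = t - a.length := by omega
    rw [h2]
    set b := rln.take (t - a.length) with hb
    have hbl : b.length ≤ t - a.length := by simp [hb]
    by_cases h3 : (((a ++ b).length : Nat) : Int) = nr
    · rw [if_pos h3]
      have h0 : t - a.length - b.length = 0 := by
        simp at h3; omega
      simp [h0]
    · rw [if_neg h3]
      rw [pvFillWarm_eq]
      have h4 : (nr - ((a ++ b).length : Int)).toNat = t - a.length - b.length := by
        simp; omega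
      rw [h4]
      simp
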